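-- pv_equiv track=rewrite | github.com/mash-97/MineField | Bakugan__1419__uri.py | first_3consecutive_position
-- ===== SOURCE A (Python) =====
-- def first_3consecutive_position(bakugan_rounds, rounds):
--   ffmpos = -1
--   p = None
--   c = 0
--   for i in range(rounds):
--     if p != bakugan_rounds[i]:
--       p = bakugan_rounds[i]
--       ffmpos = i
--       c = 1
--     elif p==bakugan_rounds[i]:
--       c += 1
--       if c==3:
--         return ffmpos
--   return -1
-- ===== SOURCE B (Python) =====
-- def first_3consecutive_position(bakugan_rounds, rounds):
--     for i in range(rounds - 2):
--         if bakugan_rounds[i] == bakugan_rounds[i + 1] == bakugan_rounds[i + 2]: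
--             return i
--     return -1
-- ===== Notes on version B (the rewrite author's own statement) =====
-- stated objective: simpler
-- what changed: Replaces A's run-length state machine (prev value, run counter, run-start index) with a stateless sliding-window scan that returns the first index i with three equal elements at i, i+1, i+2.
import Mathlib
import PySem

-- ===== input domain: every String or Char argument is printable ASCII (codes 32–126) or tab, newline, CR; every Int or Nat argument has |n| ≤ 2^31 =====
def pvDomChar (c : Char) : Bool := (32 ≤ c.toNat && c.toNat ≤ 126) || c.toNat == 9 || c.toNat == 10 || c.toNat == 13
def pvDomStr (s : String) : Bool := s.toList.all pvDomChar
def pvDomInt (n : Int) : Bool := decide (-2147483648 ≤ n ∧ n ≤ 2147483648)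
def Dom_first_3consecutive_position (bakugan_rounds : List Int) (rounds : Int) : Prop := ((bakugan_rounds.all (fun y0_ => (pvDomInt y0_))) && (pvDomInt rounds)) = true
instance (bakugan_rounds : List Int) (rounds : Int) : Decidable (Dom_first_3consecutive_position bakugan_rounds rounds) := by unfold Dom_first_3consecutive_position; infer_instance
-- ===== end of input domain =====

-- B replaces A's run-length state machine by a stateless sliding-window triple scan (objective: simpler).

-- ===== PORT A =====
-- 'for i in range(rounds)' ported as a fuel recursion counting the remaining
-- iterations, with the loop state (ffmpos, p, c) carried along; the 'none'
-- branch of pyGet? is Python's IndexError (excluded by Pre_).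
def goA (b : List Int) : Nat → Nat → Int → Option Int → Int → Int
  | 0, _, _, _, _ => -1
  | fuel+1, i, ffmpos, p, c =>
    match PySem.List.pyGet? b (i : Int) with
    | none => -1  -- IndexError in Python; unreached inside Pre_
    | some v =>
      if p ≠ some v then goA b fuel (i+1) (i : Int) (some v) 1
      else if c + 1 = 3 then ffmpos
      else goA b fuel (i+1) ffmpos p (c+1)

def first_3consecutive_position (bakugan_rounds : List Int) (rounds : Int) : Int :=
  goA bakugan_rounds rounds.toNat 0 (-1) none 0

-- ===== PORT B =====
-- 'for i in range(rounds-2)': read b[i] and b[i+1], compare, and only on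
-- equality read b[i+2] (Python's chained-comparison short-circuit);
-- the 'none' branches are IndexError (excluded by Pre_).
def goB (b : List Int) : Nat → Nat → Int
  | 0, _ => -1
  | fuel+1, j =>
    match PySem.List.pyGet? b (j : Int), PySem.List.pyGet? b ((j : Int) + 1) with
    | some u, some v =>
      if u = v then
        match PySem.List.pyGet? b ((j : Int) + 2) with
        | some w => if v = w then (j : Int) else goB b fuel (j+1)
        | none => -1  -- IndexError; unreached inside Pre_
      else goB b fuel (j+1)
    | _, _ => -1  -- IndexError; unreached inside Pre_

def first_3consecutive_position_alt (bakugan_rounds : List Int) (rounds : Int) : Int :=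
  goB bakugan_rounds (rounds - 2).toNat 0

-- ===== PRECONDITION & SPEC =====
-- Pre_ excludes exactly the inputs where Python A raises IndexError: rounds
-- exceeds the list length and no triple of equal consecutive elements occurs
-- inside the list (so the loop reaches an out-of-range index).
def Pre_first_3consecutive_position (bakugan_rounds : List Int) (rounds : Int) : Prop :=
  rounds ≤ (bakugan_rounds.length : Int) ∨
  ∃ i < bakugan_rounds.length, i + 2 < bakugan_rounds.length ∧
    bakugan_rounds[i]! = bakugan_rounds[i+1]! ∧ bakugan_rounds[i+1]! = bakugan_rounds[i+2]!
instance (bakugan_rounds : List Int) (rounds : Int) : Decidable (Pre_first_3consecutive_position bakugan_rounds rounds) := by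
  unfold Pre_first_3consecutive_position; infer_instance

def pvWitness_first_3consecutive_position : List Int × Int := ([4, 7, 7, 7, 2], 5)

def Spec_first_3consecutive_position (bakugan_rounds : List Int) (rounds : Int) (out : Int) : Prop := out = first_3consecutive_position_alt bakugan_rounds rounds
instance (bakugan_rounds : List Int) (rounds : Int) (out : Int) : Decidable (Spec_first_3consecutive_position bakugan_rounds rounds out) := by unfold Spec_first_3consecutive_position; infer_instance

-- ===== CLAIM (what is proved, stated in full; the proofs are below) =====
def Claim_equal_first_3consecutive_position : Prop := ∀ (bakugan_rounds : List Int) (rounds : Int), Dom_first_3consecutive_position bakugan_rounds rounds → Pre_first_3consecutive_position bakugan_rounds rounds → Spec_first_3consecutive_position bakugan_rounds rounds (first_3consecutive_position bakugan_rounds rounds)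

-- ===== LEMMAS AND PROOFS =====

-- Simultaneous loop invariant: with a run of length 1 (resp. 2) of value x
-- ending just before A's index, A's remaining loop equals B's remaining loop.
theorem loop_eq (f : Nat) :
    (∀ (b : List Int) (k : Nat) (x : Int),
       PySem.List.pyGet? b (k : Int) = some x →
       goA b f (k+1) (k : Int) (some x) 1 = goB b (f-1) k) ∧
    (∀ (b : List Int) (k : Nat) (x : Int),
       PySem.List.pyGet? b (k : Int) = some x →
       PySem.List.pyGet? b ((k : Int) + 1) = some x →
       goA b f (k+2) (k : Int) (some x) 2 = goB b f k) := by
  induction f with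
  | zero =>
    constructor
    · intro b k x _; simp [goA, goB]
    · intro b k x _ _; simp [goA, goB]
  | succ f ih =>
    obtain ⟨ih1, ih2⟩ := ih
    have hcast1 : ∀ k : Nat, ((k+1 : Nat) : Int) = (k : Int) + 1 := by intro k; push_cast; ring
    have hcast2 : ∀ k : Nat, ((k+2 : Nat) : Int) = (k : Int) + 2 := by intro k; push_cast; ring
    constructor
    · -- run of length 1 ending at k; A at index k+1, B at index k
      intro b k x hk
      show goA b (f+1) (k+1) (k : Int) (some x) 1 = goB b f k
      rw [goA]
      rw [hcast1 k]
      cases hnext : PySem.List.pyGet? b ((k : Int) + 1) with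
      | none =>
        -- A raises (-1); B reads b[k+1] = none (or has no fuel) and gives -1
        cases f with
        | zero => simp [goB]
        | succ g => rw [goB]; rw [hk, hnext]
      | some y =>
        by_cases hxy : x = y
        · -- run extends to length 2: A keeps scanning, B stays at k
          subst hxy
          simp only [ne_eq, not_true_eq_false, if_false]
          have h2 := ih2 b k x hk hnext
          simpa using h2
        · -- new run of value y starting at k+1; B advances from k to k+1
          have hne : some x ≠ some y := by simpa using hxy
          simp only [hne, ne_eq, not_false_eq_true, if_pos]
          cases f with
          | zero => simp [goA, goB]
          | succ g =>
            have h1 := ih1 b (k+1) y (by rw [hcast1 k]; exact hnext)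
            rw [goB, hk, hnext]
            simp only [hxy, if_false]
            simpa using h1
    · -- run of length 2 (b[k] = b[k+1] = x); A at index k+2, B at index k
      intro b k x hk hk1
      show goA b (f+1) (k+2) (k : Int) (some x) 2 = goB b (f+1) k
      rw [goA, goB]
      rw [hcast2 k, hk, hk1]
      cases hnext : PySem.List.pyGet? b ((k : Int) + 2) with
      | none => simp
      | some y =>
        by_cases hxy : x = y
        · -- triple complete: A returns ffmpos = k, B returns k
          subst hxy
          simp
        · -- run breaks: A starts run of y at k+2; B advances k → k+1 → k+2
          have hne : some x ≠ some y := by simpa using hxy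
          simp only [hne, ne_eq, not_false_eq_true, if_pos, hxy,
            if_neg]
          cases f with
          | zero => simp [goA, goB]
          | succ g =>
            have h1 := ih1 b (k+2) y (by rw [hcast2 k]; exact hnext)
            rw [goB]
            push_cast
            have e2 : ((k:Int)+1)+1 = (k:Int)+2 := by ring
            rw [e2]
            simp only [hk1, hnext, if_neg hxy]
            have hxx : goA b (g+1) (k+2+1) ((k:Int)+2) (some y) 1 = goB b g (k+2) := by
              simpa [hcast2 k] using h1
            simpa using hxx

theorem ports_agree (b : List Int) (r : Int) :
    first_3consecutive_position b r = first_3consecutive_position_alt b r := by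
  unfold first_3consecutive_position first_3consecutive_position_alt
  have hfuel : (r - 2).toNat = r.toNat - 2 := by omega
  rw [hfuel]
  cases hm : r.toNat with
  | zero =>
    simp [goA, goB]
  | succ m =>
    rw [goA]
    cases h0 : PySem.List.pyGet? b (0 : Int) with
    | none =>
      -- A raises at index 0; B also sees none (or runs out of fuel)
      cases hm2 : m + 1 - 2 with
      | zero => simp [goB]
      | succ g =>
        rw [goB]
        simp [h0]
    | some x =>
      have hne : (none : Option Int) ≠ some x := by simp
      simp only [hne, ne_eq, not_false_eq_true, if_pos]
      have h1 := (loop_eq m).1 b 0 x (by simpa using h0)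
      have : m - 1 = m + 1 - 2 := by omega
      rw [this] at h1
      simpa using h1

theorem first_3consecutive_position_spec : Claim_equal_first_3consecutive_position := by
  intro b r _ _
  unfold Spec_first_3consecutive_position
  exact ports_agree b r
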